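-- pv_equiv track=rewrite | github.com/Kristie-source/pharmacy101-ui | resolution_memory.py | is_full_fingerprint
-- ===== SOURCE A (Python) =====
-- from typing import Optional, Any
--
-- _REQUIRED_FP_KEYS = frozenset({"D", "I", "F", "S", "T", "P", "Q"})
--
-- def is_full_fingerprint(fp: Optional[str]) -> bool:
--     if not fp:
--         return False
--
--     parts = str(fp).split("|")
--     if len(parts) != 7:
--         return False
--
--     keys = set()
--     for part in parts:
--         idx = part.find(":")
--         if idx > 0:
--             keys.add(part[:idx])
--
--     return _REQUIRED_FP_KEYS.issubset(keys)
-- ===== SOURCE B (Python) =====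
-- from typing import Optional
--
-- _FP_KEYS = ("D", "I", "F", "S", "T", "P", "Q")
--
-- def _key_bit(part: str) -> int:
--     i = part.find(":")
--     if i > 0:
--         k = part[:i]
--         if k in _FP_KEYS:
--             return 1 << _FP_KEYS.index(k)
--     return 0
--
-- def is_full_fingerprint(fp: Optional[str]) -> bool:
--     if not fp:
--         return False
--     mask = 0
--     nparts = 1
--     cur = ""
--     for ch in str(fp):
--         if ch == "|":
--             mask |= _key_bit(cur)
--             nparts += 1
--             cur = ""
--         else:
--             cur = cur + ch
--     mask |= _key_bit(cur)
--     return nparts == 7 and mask == 127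
-- ===== Notes on version B (the rewrite author's own statement) =====
-- stated objective: alternative
-- what changed: A splits the string into a parts list, builds a set of observed colon-prefix keys and tests subset; B never splits or builds a set: it runs a single character-level state machine over the raw string, tracking the part count and a 7-bit mask of required keys, closing the running part at each separator and at the end.
import Mathlib
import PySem

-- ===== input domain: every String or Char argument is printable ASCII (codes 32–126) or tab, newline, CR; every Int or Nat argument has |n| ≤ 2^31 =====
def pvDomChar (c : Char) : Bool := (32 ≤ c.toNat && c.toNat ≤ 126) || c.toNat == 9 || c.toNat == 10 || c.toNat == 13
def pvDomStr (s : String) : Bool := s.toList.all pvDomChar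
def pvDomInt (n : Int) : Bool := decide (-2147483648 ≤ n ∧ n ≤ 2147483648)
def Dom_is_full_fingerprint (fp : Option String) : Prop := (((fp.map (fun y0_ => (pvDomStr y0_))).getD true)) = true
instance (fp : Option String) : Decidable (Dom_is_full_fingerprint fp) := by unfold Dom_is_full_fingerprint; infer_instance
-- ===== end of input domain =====

-- B replaces A's split-then-set-subset pass by a single character-level state machine over the
-- raw string: one scan tracking the part count and a bitmask of required keys seen (alternative decomposition, same cost).

-- ===== PORT A =====
def pvReqKeys : List (List Char) := [['D'], ['I'], ['F'], ['S'], ['T'], ['P'], ['Q']]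

def is_full_fingerprint (fp : Option String) : Bool :=
  match fp with
  | none => false
  | some s =>
    if s = "" then false
    else
      let parts := PySem.Chars.splitOn s.toList ['|']
      if parts.length ≠ 7 then false
      else
        let keys := parts.foldl (fun keys part =>
          let idx := PySem.Chars.find part [':']
          if idx > 0 then PySem.Set.add keys (PySem.List.slice part none (some idx)) else keys)
          PySem.Set.empty
        PySem.Set.issubset (PySem.Set.ofList pvReqKeys) keys

-- ===== PORT B =====
-- the ordered tuple _FP_KEYS of Source B
def pvFpKeys : List (List Char) := [['D'], ['I'], ['F'], ['S'], ['T'], ['P'], ['Q']]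

-- _key_bit(part): 1 << _FP_KEYS.index(part[:i]) when the colon-prefix is a required key, else 0
def pvKeyBit (part : List Char) : Nat :=
  if PySem.Chars.find part [':'] > 0 then
    if pvFpKeys.contains (PySem.List.slice part none (some (PySem.Chars.find part [':']))) then
      match PySem.List.index? pvFpKeys (PySem.List.slice part none (some (PySem.Chars.find part [':']))) with
      | some j => 1 <<< j
      | none => 0
    else 0
  else 0

-- the for-loop of Source B: state = (mask, nparts, cur); closes the running part on '|' and at the end
def pvFpLoop : List Char → Nat → Nat → List Char → Nat × Nat
  | [], mask, nparts, cur => (mask ||| pvKeyBit cur, nparts)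
  | ch :: rest, mask, nparts, cur =>
    if ch = '|' then pvFpLoop rest (mask ||| pvKeyBit cur) (nparts + 1) []
    else pvFpLoop rest mask nparts (cur ++ [ch])

def is_full_fingerprint_alt (fp : Option String) : Bool :=
  match fp with
  | none => false
  | some s =>
    if s = "" then false
    else
      let r := pvFpLoop s.toList 0 1 []
      r.2 == 7 && r.1 == 127

-- ===== PRECONDITION & SPEC =====
def Spec_is_full_fingerprint (fp : Option String) (out : Bool) : Prop := out = is_full_fingerprint_alt fp
instance (fp : Option String) (out : Bool) : Decidable (Spec_is_full_fingerprint fp out) := by unfold Spec_is_full_fingerprint; infer_instance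

-- ===== CLAIM (what is proved, stated in full; the proofs are below) =====
def Claim_equal_is_full_fingerprint : Prop := ∀ (fp : Option String), Dom_is_full_fingerprint fp → Spec_is_full_fingerprint fp (is_full_fingerprint fp)

-- ===== LEMMAS AND PROOFS =====

-- proof-side splitter: what B's scan produces part-wise (single-char separator '|')
def pvSplit1 : List Char → List Char → List (List Char)
  | [], cur => [cur]
  | h :: t, cur => if h = '|' then cur :: pvSplit1 t [] else pvSplit1 t (cur ++ [h])

theorem pvSplit1_length_pos (l cur : List Char) : 0 < (pvSplit1 l cur).length := by
  induction l generalizing cur with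
  | nil => simp [pvSplit1]
  | cons h t ih =>
    unfold pvSplit1
    split
    · simp
    · exact ih _

-- B's scan, expressed over the parts pvSplit1 yields
theorem pvFpLoop_eq (l : List Char) (mask nparts : Nat) (cur : List Char) :
    pvFpLoop l mask nparts cur =
      ((pvSplit1 l cur).foldl (fun m p => m ||| pvKeyBit p) mask,
       nparts + ((pvSplit1 l cur).length - 1)) := by
  induction l generalizing mask nparts cur with
  | nil => simp [pvFpLoop, pvSplit1]
  | cons ch t ih =>
    by_cases hc : ch = '|'
    · have hp := pvSplit1_length_pos t []
      rw [show pvFpLoop (ch :: t) mask nparts cur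
            = pvFpLoop t (mask ||| pvKeyBit cur) (nparts + 1) [] from by simp [pvFpLoop, hc],
          show pvSplit1 (ch :: t) cur = cur :: pvSplit1 t [] from by simp [pvSplit1, hc], ih]
      simp only [List.foldl_cons, List.length_cons, Prod.mk.injEq]
      exact ⟨by trivial, by omega⟩
    · rw [show pvFpLoop (ch :: t) mask nparts cur
            = pvFpLoop t mask nparts (cur ++ [ch]) from by simp [pvFpLoop, hc],
          show pvSplit1 (ch :: t) cur = pvSplit1 t (cur ++ [ch]) from by simp [pvSplit1, hc], ih]

-- PySem.Chars.splitOn on the single-char separator '|' IS pvSplit1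
theorem pvGo_eq (fuel : Nat) : ∀ (l cur : List Char) (acc : List (List Char)),
    l.length < fuel →
    PySem.Chars.splitOn.go ['|'] fuel l cur acc = acc.reverse ++ pvSplit1 l cur.reverse := by
  induction fuel with
  | zero => intro l cur acc h; omega
  | succ f ih =>
    intro l cur acc h
    match l with
    | [] => simp [PySem.Chars.splitOn.go, pvSplit1]
    | c :: rest =>
      by_cases hc : c = '|'
      · subst hc
        simp only [PySem.Chars.splitOn.go, List.isPrefixOf, BEq.rfl, Bool.true_and, if_pos]
        have hdrop : List.drop ['|'].length ('|' :: rest) = rest := rfl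
        rw [hdrop, ih rest [] ((cur.reverse) :: acc) (by simpa using Nat.lt_of_succ_lt_succ h)]
        simp [pvSplit1]
      · have hpre : List.isPrefixOf ['|'] (c :: rest) = false := by
          simp [List.isPrefixOf]; exact fun hx => absurd hx.symm hc
        simp only [PySem.Chars.splitOn.go, hpre, Bool.false_eq_true, if_false]
        rw [ih rest (c :: cur) acc (by simpa using Nat.lt_of_succ_lt_succ h)]
        simp [pvSplit1, hc]

theorem pvSplitOn_eq (l : List Char) :
    PySem.Chars.splitOn l ['|'] = pvSplit1 l [] := by
  unfold PySem.Chars.splitOn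
  rw [pvGo_eq (l.length + 1) l [] [] (by omega)]
  rfl

-- the predicate both programs decide, key by key
def pvHasKey (parts : List (List Char)) (key : List Char) : Prop :=
  ∃ p ∈ parts, PySem.Chars.find p [':'] > 0 ∧
    PySem.List.slice p none (some (PySem.Chars.find p [':'])) = key

-- membership in A's fold-built key set
theorem mem_keys_foldl (parts : List (List Char)) (acc : PySem.Set (List Char)) (x : List Char) :
    x ∈ parts.foldl (fun keys part =>
          let idx := PySem.Chars.find part [':']
          if idx > 0 then PySem.Set.add keys (PySem.List.slice part none (some idx)) else keys) acc
    ↔ x ∈ acc ∨ pvHasKey parts x := by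
  induction parts generalizing acc with
  | nil => simp [pvHasKey]
  | cons hd tl ih =>
    simp only [List.foldl_cons, ih, pvHasKey, List.mem_cons]
    by_cases h : PySem.Chars.find hd [':'] > 0
    · simp only [h, if_pos, PySem.Set.mem_add]
      constructor
      · rintro ((hx | hx) | ⟨p, hp, hc⟩)
        · exact Or.inl hx
        · exact Or.inr ⟨hd, Or.inl rfl, h, hx.symm⟩
        · exact Or.inr ⟨p, Or.inr hp, hc⟩
      · rintro (hx | ⟨p, (rfl | hp), hc, he⟩)
        · exact Or.inl (Or.inl hx)
        · exact Or.inl (Or.inr he.symm)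
        · exact Or.inr ⟨p, hp, hc, he⟩
    · simp only [h, if_false]
      constructor
      · rintro (hx | ⟨p, hp, hc⟩)
        · exact Or.inl hx
        · exact Or.inr ⟨p, Or.inr hp, hc⟩
      · rintro (hx | ⟨p, (rfl | hp), hc, he⟩)
        · exact Or.inl hx
        · exact absurd hc h
        · exact Or.inr ⟨p, hp, hc, he⟩

theorem pvKeyBit_lt (p : List Char) : pvKeyBit p < 128 := by
  unfold pvKeyBit
  split
  · split
    · split
      · next j hj =>
        have hmem := (List.idxOf?_eq_some_iff.mp (by simpa [PySem.List.index?] using hj)).1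
        have hj7 : j < 7 := by simpa [pvFpKeys] using hmem
        rw [Nat.one_shiftLeft]
        calc 2 ^ j ≤ 2 ^ 6 := Nat.pow_le_pow_right (by omega) (by omega)
          _ < 128 := by omega
      · omega
    · omega
  · omega

theorem pvKeyBit_testBit (p : List Char) (j : Nat) (hj : j < 7) :
    (pvKeyBit p).testBit j = true ↔
      PySem.Chars.find p [':'] > 0 ∧
      PySem.List.slice p none (some (PySem.Chars.find p [':'])) = pvFpKeys[j]'(by simp [pvFpKeys]; omega) := by
  have hjlen : j < pvFpKeys.length := by simp [pvFpKeys]; omega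
  unfold pvKeyBit
  by_cases hf : PySem.Chars.find p [':'] > 0
  · rw [if_pos hf]
    simp only [hf, true_and]
    by_cases hc : pvFpKeys.contains (PySem.List.slice p none (some (PySem.Chars.find p [':'])))
    · rw [if_pos hc]
      cases hidx : PySem.List.index? pvFpKeys
          (PySem.List.slice p none (some (PySem.Chars.find p [':']))) with
      | none =>
        exact absurd (by simpa using hc)
          (List.idxOf?_eq_none_iff.mp (by simpa [PySem.List.index?] using hidx))
      | some i =>
        obtain ⟨hi7, hget, -⟩ := List.idxOf?_eq_some_iff.mp (by simpa [PySem.List.index?] using hidx)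
        show (1 <<< i).testBit j = true ↔
          PySem.List.slice p none (some (PySem.Chars.find p [':'])) = pvFpKeys[j]'hjlen
        rw [Nat.one_shiftLeft, Nat.testBit_two_pow]
        constructor
        · intro h
          have hij : i = j := by simpa using h
          subst hij
          exact hget.symm
        · intro h
          have hnd : pvFpKeys.Nodup := by decide
          have hij : i = j := (List.Nodup.getElem_inj_iff hnd).mp (by rw [hget, h])
          simpa using hij
    · rw [if_neg hc]
      simp only [Nat.zero_testBit, Bool.false_eq_true, false_iff]
      intro h
      apply hc
      apply List.elem_eq_true_of_mem
      rw [h]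
      exact List.getElem_mem _
  · rw [if_neg hf]
    simp only [Nat.zero_testBit, Bool.false_eq_true, false_iff]
    intro h
    exact hf h.1

theorem pvFold_testBit (parts : List (List Char)) (m j : Nat) :
    (parts.foldl (fun m p => m ||| pvKeyBit p) m).testBit j =
      (m.testBit j || parts.any fun p => (pvKeyBit p).testBit j) := by
  induction parts generalizing m with
  | nil => simp
  | cons hd tl ih => simp [ih, Nat.testBit_or, Bool.or_assoc]

theorem pvMask127_iff (parts : List (List Char)) :
    parts.foldl (fun m p => m ||| pvKeyBit p) 0 = 127 ↔
      ∀ key ∈ pvFpKeys, pvHasKey parts key := by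
  constructor
  · intro h key hkey
    obtain ⟨j, hj, rfl⟩ := List.mem_iff_getElem.mp hkey
    have hj7 : j < 7 := by simpa [pvFpKeys] using hj
    have hbit : (127 : Nat).testBit j = true := by interval_cases j <;> decide
    rw [← h, pvFold_testBit] at hbit
    simp only [Nat.zero_testBit, Bool.false_or, List.any_eq_true] at hbit
    obtain ⟨p, hp, hb⟩ := hbit
    obtain ⟨h1, h2⟩ := (pvKeyBit_testBit p j hj7).mp hb
    exact ⟨p, hp, h1, h2⟩
  · intro h
    apply Nat.eq_of_testBit_eq
    intro j
    rw [pvFold_testBit]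
    simp only [Nat.zero_testBit, Bool.false_or]
    by_cases hj7 : j < 7
    · have hbit : (127 : Nat).testBit j = true := by interval_cases j <;> decide
      rw [hbit]
      obtain ⟨p, hp, h1, h2⟩ := h (pvFpKeys[j]'(by simp [pvFpKeys]; omega)) (List.getElem_mem _)
      simp only [List.any_eq_true]
      exact ⟨p, hp, (pvKeyBit_testBit p j hj7).mpr ⟨h1, h2⟩⟩
    · have h128 : (128 : Nat) ≤ 2 ^ j :=
        calc (128 : Nat) = 2 ^ 7 := by omega
          _ ≤ 2 ^ j := Nat.pow_le_pow_right (by omega) (by omega)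
      have h127 : (127 : Nat).testBit j = false := Nat.testBit_lt_two_pow (by omega)
      rw [h127]
      simp only [List.any_eq_false, Bool.not_eq_true]
      intro p _
      exact Nat.testBit_lt_two_pow (by have := pvKeyBit_lt p; omega)

theorem is_full_fingerprint_eq (fp : Option String) :
    is_full_fingerprint_alt fp = is_full_fingerprint fp := by
  unfold is_full_fingerprint is_full_fingerprint_alt
  match fp with
  | none => rfl
  | some s =>
    by_cases hs : s = ""
    · simp [hs]
    · simp only [hs, if_false]
      rw [pvFpLoop_eq, pvSplitOn_eq]
      set parts := pvSplit1 s.toList [] with hparts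
      have hpos : 0 < parts.length := pvSplit1_length_pos _ _
      by_cases hl : parts.length = 7
      · simp only [hl, ne_eq, not_true_eq_false, if_false]
        rw [Bool.eq_iff_iff]
        simp only [Bool.and_eq_true, beq_iff_eq, PySem.Set.issubset_iff]
        rw [pvMask127_iff]
        constructor
        · rintro ⟨-, h⟩ key hkey
          have hkey' : key ∈ pvFpKeys := by
            simpa [PySem.Set.mem_ofList, pvReqKeys, pvFpKeys] using hkey
          rw [mem_keys_foldl]
          exact Or.inr (h key hkey')
        · intro h
          refine ⟨by trivial, fun key hkey => ?_⟩
          have hget := h key (by simpa [PySem.Set.mem_ofList, pvReqKeys, pvFpKeys] using hkey)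
          rcases (mem_keys_foldl parts PySem.Set.empty key).mp hget with hx | hx
          · simp [PySem.Set.empty] at hx
          · exact hx
      · simp only [hl, ne_eq, not_false_eq_true, if_pos]
        have hne : 1 + (parts.length - 1) ≠ 7 := by omega
        simp [hne]

-- ===== VERDICT (by name: the statement is the Claim_ definition above) =====
theorem is_full_fingerprint_spec : Claim_equal_is_full_fingerprint := by
  intro fp _
  unfold Spec_is_full_fingerprint
  exact (is_full_fingerprint_eq fp).symm
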